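-- pv_equiv track=rewrite | github.com/blu3eee/aoc | 2022/day03/main.py | part2
-- ===== SOURCE A (Python) =====
-- def part2(data):
--     ans = 0
--
--     for i in range(len(data)//3):
--
--         a = set(data[i*3])
--         b = set(data[i*3+1])
--         c = set(data[i*3+2])
--
--         commons = a.intersection(b).intersection(c)
--         # only has 1 common character
--
--         for char in commons:
--             ans += ((ord(char) - ord('a') + 1) if str(char).islower() else (ord(char) - ord('A') + 1 + 26))
--     return ans
-- ===== SOURCE B (Python) =====
-- def part2(data):
--     total = 0
--     for i in range(len(data) // 3):
--         x = data[i * 3]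
--         y = data[i * 3 + 1]
--         z = data[i * 3 + 2]
--         # scan the whole ASCII alphabet once instead of building sets and intersecting
--         for code in range(128):
--             ch = chr(code)
--             if ch in x and ch in y and ch in z:
--                 total += code - 96 if 97 <= code <= 122 else code - 38
--     return total
-- ===== Notes on version B (the rewrite author's own statement) =====
-- stated objective: alternative
-- what changed: Instead of materialising a Python set per line and intersecting the three sets, B scans the fixed 128-character ASCII alphabet once per group and tests each candidate character for substring membership in all three lines, computing the priority directly from the character code.
import Mathlib
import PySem

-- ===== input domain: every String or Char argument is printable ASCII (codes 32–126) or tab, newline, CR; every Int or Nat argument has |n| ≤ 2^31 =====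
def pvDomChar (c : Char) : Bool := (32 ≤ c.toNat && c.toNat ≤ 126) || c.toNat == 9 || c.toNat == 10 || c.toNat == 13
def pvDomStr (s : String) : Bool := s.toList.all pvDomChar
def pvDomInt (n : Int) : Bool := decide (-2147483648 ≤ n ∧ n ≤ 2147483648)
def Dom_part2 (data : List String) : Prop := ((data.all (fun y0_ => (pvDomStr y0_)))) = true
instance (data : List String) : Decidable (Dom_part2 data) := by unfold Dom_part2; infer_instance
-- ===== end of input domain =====

-- B replaces the per-group set construction and set intersection of A by a single scan of the
-- fixed 128-character ASCII alphabet with substring-membership tests (alternative algorithm, same cost class).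


-- ===== PORT A =====
def part2 (data : List String) : Int :=
  (PySem.List.pyRange 0 (PySem.Int.floordiv (PySem.List.len data) 3)).foldl
    (fun ans i =>
      let a : PySem.Set Char := PySem.Set.ofList (PySem.List.pyGetD data (i * 3) "").toList
      let b : PySem.Set Char := PySem.Set.ofList (PySem.List.pyGetD data (i * 3 + 1) "").toList
      let c : PySem.Set Char := PySem.Set.ofList (PySem.List.pyGetD data (i * 3 + 2) "").toList
      let commons := PySem.Set.inter (PySem.Set.inter a b) c
      -- sum over the set's elements: the result is order-independent (a sum of Ints)
      commons.foldl
        (fun ans ch =>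
          ans + (if PySem.Str.islower ch then ((ch.toNat : Int) - 97 + 1)
                 else ((ch.toNat : Int) - 65 + 1 + 26)))
        ans)
    0

-- ===== PORT B =====
def part2_alt (data : List String) : Int :=
  (PySem.List.pyRange 0 (PySem.Int.floordiv (PySem.List.len data) 3)).foldl
    (fun total i =>
      let x := PySem.List.pyGetD data (i * 3) ""
      let y := PySem.List.pyGetD data (i * 3 + 1) ""
      let z := PySem.List.pyGetD data (i * 3 + 2) ""
      (PySem.List.pyRange 0 128).foldl
        (fun total code =>
          let ch := String.ofList [Char.ofNat code.toNat]
          if PySem.Str.isIn ch x && PySem.Str.isIn ch y && PySem.Str.isIn ch z then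
            total + (if 97 ≤ code ∧ code ≤ 122 then code - 96 else code - 38)
          else total)
        total)
    0

-- ===== PRECONDITION & SPEC =====
def Spec_part2 (data : List String) (out : Int) : Prop := out = part2_alt data
instance (data : List String) (out : Int) : Decidable (Spec_part2 data out) := by unfold Spec_part2; infer_instance

-- ===== CLAIM (what is proved, stated in full; the proofs are below) =====
def Claim_equal_part2 : Prop := ∀ (data : List String), Dom_part2 data → Spec_part2 data (part2 data)

-- ===== LEMMAS AND PROOFS =====

-- the priority of a character code, as B computes it
def pvPr (k : Nat) : Int := if 97 ≤ k ∧ k ≤ 122 then (k : Int) - 96 else (k : Int) - 38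

theorem pvToNat_ofNat (k : Nat) (h : k < 128) : (Char.ofNat k).toNat = k := by
  rw [Char.toNat_ofNat, if_pos (Or.inl (by omega))]

theorem pvIslower_iff (c : Char) : (PySem.Str.islower c = true) ↔ (97 ≤ c.toNat ∧ c.toNat ≤ 122) := by
  simp only [PySem.Str.islower, PySem.Chars.islower, Bool.and_eq_true, decide_eq_true_eq, Char.le_def]
  exact ⟨fun ⟨h1, h2⟩ => ⟨h1, h2⟩, fun ⟨h1, h2⟩ => ⟨h1, h2⟩⟩

theorem pvPrA_eq (c : Char) :
    (if PySem.Str.islower c then ((c.toNat : Int) - 97 + 1) else ((c.toNat : Int) - 65 + 1 + 26))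
      = pvPr c.toNat := by
  unfold pvPr
  by_cases h : PySem.Str.islower c = true
  · rw [if_pos h, if_pos ((pvIslower_iff c).mp h)]; ring
  · rw [if_neg h, if_neg (fun hc => h ((pvIslower_iff c).mpr hc))]; ring

theorem pvIsIn_singleton (c : Char) (s : String) :
    (PySem.Str.isIn (String.ofList [c]) s = true) ↔ c ∈ s.toList := by
  rw [PySem.Str.isIn_iff_infix, String.toList_ofList, List.singleton_infix_iff]

theorem pvSum_if_filter (l : List Nat) (p : Nat → Bool) (f : Nat → Int) :
    (l.map fun k => if p k then f k else 0).sum = ((l.filter p).map f).sum := by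
  induction l with
  | nil => rfl
  | cons a t ih => by_cases h : p a <;> simp [h, ih]

theorem pvToNat_inj (a b : Char) (h : a.toNat = b.toNat) : a = b := by
  apply Char.ext; exact UInt32.toNat_inj.mp h

-- per-group core: sum of priorities over the intersection set = sum over the alphabet scan
theorem pvGroup_sum (x y z : String) (hx : ∀ c ∈ x.toList, c.toNat < 128) :
    ((PySem.Set.inter (PySem.Set.inter (PySem.Set.ofList x.toList) (PySem.Set.ofList y.toList))
        (PySem.Set.ofList z.toList)).map (fun c => pvPr c.toNat)).sum
      = (((List.range 128).filter (fun k =>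
            PySem.Str.isIn (String.ofList [Char.ofNat k]) x &&
            PySem.Str.isIn (String.ofList [Char.ofNat k]) y &&
            PySem.Str.isIn (String.ofList [Char.ofNat k]) z)).map pvPr).sum := by
  set S := PySem.Set.inter (PySem.Set.inter (PySem.Set.ofList x.toList) (PySem.Set.ofList y.toList))
      (PySem.Set.ofList z.toList) with hS
  have hmem : ∀ c, c ∈ S ↔ c ∈ x.toList ∧ c ∈ y.toList ∧ c ∈ z.toList := by
    intro c
    simp [hS, PySem.Set.mem_inter, PySem.Set.mem_ofList, and_assoc]
  have hnd : S.Nodup :=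
    PySem.Set.nodup_inter _ _ (PySem.Set.nodup_inter _ _ (PySem.Set.nodup_ofList _))
  have hperm : (S.map Char.toNat).Perm ((List.range 128).filter (fun k =>
        PySem.Str.isIn (String.ofList [Char.ofNat k]) x &&
        PySem.Str.isIn (String.ofList [Char.ofNat k]) y &&
        PySem.Str.isIn (String.ofList [Char.ofNat k]) z)) := by
    rw [List.perm_ext_iff_of_nodup (hnd.map (fun a b => pvToNat_inj a b))
      ((List.nodup_range).filter _)]
    intro k
    simp only [List.mem_map, List.mem_filter, List.mem_range, Bool.and_eq_true,
      pvIsIn_singleton]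
    constructor
    · rintro ⟨c, hc, rfl⟩
      have hm := (hmem c).mp hc
      have h128 : c.toNat < 128 := hx c hm.1
      refine ⟨h128, ?_⟩
      rw [Char.ofNat_toNat]
      exact ⟨⟨hm.1, hm.2.1⟩, hm.2.2⟩
    · rintro ⟨h128, ⟨h1, h2⟩, h3⟩
      exact ⟨Char.ofNat k, (hmem _).mpr ⟨h1, h2, h3⟩, pvToNat_ofNat k h128⟩
  calc (S.map (fun c => pvPr c.toNat)).sum
      = ((S.map Char.toNat).map pvPr).sum := by rw [List.map_map]; rfl
    _ = _ := (hperm.map pvPr).sum_eq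

-- ===== VERDICT (by name: the statement is the Claim_ definition above) =====
theorem part2_spec : Claim_equal_part2 := by
  intro data hdom
  unfold Spec_part2 part2 part2_alt
  apply PySem.List.foldl_congr_mem
  intro acc i hi
  obtain ⟨hi0, hi1⟩ := PySem.List.mem_pyRange_one.mp hi
  rw [PySem.Int.floordiv_eq_ediv_of_pos (by norm_num), PySem.List.len_eq] at hi1
  have hlen : i * 3 + 2 < (data.length : Int) := by omega
  have hir : ∀ j : Int, 0 ≤ j → j ≤ i * 3 + 2 →
      PySem.Raise.InRange data.length j := by
    intro j hj0 hj2
    simp only [PySem.Raise.InRange]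
    omega
  have hdom' : ∀ s ∈ data, ∀ c ∈ s.toList, c.toNat < 128 := by
    simp only [Dom_part2, List.all_eq_true, pvDomStr, pvDomChar] at hdom
    intro s hs c hc
    have := hdom s hs
    have := this c hc
    simp only [Bool.or_eq_true, Bool.and_eq_true, decide_eq_true_eq, beq_iff_eq] at this
    omega
  have hx : ∀ c ∈ (PySem.List.pyGetD data (i * 3) "").toList, c.toNat < 128 :=
    hdom' _ (PySem.List.pyGetD_mem data "" (hir _ (by omega) (by omega)))
  -- A's inner fold is acc + (sum of priorities over the intersection)
  rw [PySem.List.foldl_add]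
  -- rewrite each summand into pvPr of the code
  rw [List.map_congr_left (fun c _ => pvPrA_eq c)]
  -- B's inner fold over range(128)
  have h128 : (128 : Int) = ((128 : Nat) : Int) := by norm_num
  rw [h128, PySem.List.pyRange_zero_natCast, List.foldl_map]
  have hbody : ∀ (total : Int), ∀ k ∈ List.range 128,
      (fun (total : Int) (code : Int) =>
        let ch := String.ofList [Char.ofNat code.toNat]
        if PySem.Str.isIn ch (PySem.List.pyGetD data (i * 3) "") &&
           PySem.Str.isIn ch (PySem.List.pyGetD data (i * 3 + 1) "") &&
           PySem.Str.isIn ch (PySem.List.pyGetD data (i * 3 + 2) "") then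
          total + (if 97 ≤ code ∧ code ≤ 122 then code - 96 else code - 38)
        else total) total ((k : Nat) : Int)
      = total + (if (PySem.Str.isIn (String.ofList [Char.ofNat k]) (PySem.List.pyGetD data (i * 3) "") &&
           PySem.Str.isIn (String.ofList [Char.ofNat k]) (PySem.List.pyGetD data (i * 3 + 1) "") &&
           PySem.Str.isIn (String.ofList [Char.ofNat k]) (PySem.List.pyGetD data (i * 3 + 2) "")) then
          pvPr k else 0) := by
    intro total k _
    simp only [Int.toNat_natCast]
    by_cases hc : (PySem.Str.isIn (String.ofList [Char.ofNat k]) (PySem.List.pyGetD data (i * 3) "") &&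
           PySem.Str.isIn (String.ofList [Char.ofNat k]) (PySem.List.pyGetD data (i * 3 + 1) "") &&
           PySem.Str.isIn (String.ofList [Char.ofNat k]) (PySem.List.pyGetD data (i * 3 + 2) "")) = true
    · rw [if_pos hc, if_pos hc]
      unfold pvPr
      congr 1
      by_cases hk : 97 ≤ k ∧ k ≤ 122
      · rw [if_pos (by exact_mod_cast hk), if_pos hk]
      · rw [if_neg (by exact_mod_cast hk), if_neg hk]
    · rw [if_neg hc, if_neg hc, add_zero]
  rw [PySem.List.foldl_congr_mem _ _ _ _ hbody, PySem.List.foldl_add]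
  rw [pvSum_if_filter]
  rw [pvGroup_sum _ _ _ hx]
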